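-- pv_equiv track=rewrite | github.com/navmou/lunar_lander | logic.py | vertical_plus_turn
-- ===== SOURCE A (Python) =====
-- def vertical_plus_turn(board , player , x , y , turning_list,counter):
--     if x > 0:
--         if board[x-1][y] == -player:
--             counter+=1
--             turning_list.append((x-1,y))
--             return vertical_plus_turn(board,player,x-1,y,turning_list,counter)
--         elif board[x-1][y] == player:
--             return turning_list
--         else:
--             for i in range(counter):
--                 turning_list.pop(-1)
--             return turning_list
--     else:
--         return turning_list
-- ===== SOURCE B (Python) =====
-- def vertical_plus_turn(board, player, x, y, turning_list, counter):
--     # Scan upward: measure the run of opponent tiles above (x-1 down), then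
--     # extend once and, if the run ends on a blank cell, delete one slice
--     # (collected tiles plus the `counter` earlier ones) instead of popping.
--     k = 0
--     while k < x and board[x - 1 - k][y] == -player:
--         k += 1
--     turning_list.extend((x - 1 - j, y) for j in range(k))
--     if k < x and board[x - 1 - k][y] != player:
--         pops = counter + k
--         if pops > 0:
--             del turning_list[-pops:]
--     return turning_list
-- ===== Notes on version B (the rewrite author's own statement) =====
-- stated objective: alternative
-- what changed: A is a tail recursion that appends a tile per step and undoes its work by popping one element at a time; B measures the opponent-run length with a scan, extends the list once, and removes the collected-plus-counter tiles with a single slice deletion (no recursion, no pops).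
-- outside the precondition, e.g. on vertical_plus_turn([[], [1]], 1, 2, 0, [], 0): A returns [], B returns []
import Mathlib
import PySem

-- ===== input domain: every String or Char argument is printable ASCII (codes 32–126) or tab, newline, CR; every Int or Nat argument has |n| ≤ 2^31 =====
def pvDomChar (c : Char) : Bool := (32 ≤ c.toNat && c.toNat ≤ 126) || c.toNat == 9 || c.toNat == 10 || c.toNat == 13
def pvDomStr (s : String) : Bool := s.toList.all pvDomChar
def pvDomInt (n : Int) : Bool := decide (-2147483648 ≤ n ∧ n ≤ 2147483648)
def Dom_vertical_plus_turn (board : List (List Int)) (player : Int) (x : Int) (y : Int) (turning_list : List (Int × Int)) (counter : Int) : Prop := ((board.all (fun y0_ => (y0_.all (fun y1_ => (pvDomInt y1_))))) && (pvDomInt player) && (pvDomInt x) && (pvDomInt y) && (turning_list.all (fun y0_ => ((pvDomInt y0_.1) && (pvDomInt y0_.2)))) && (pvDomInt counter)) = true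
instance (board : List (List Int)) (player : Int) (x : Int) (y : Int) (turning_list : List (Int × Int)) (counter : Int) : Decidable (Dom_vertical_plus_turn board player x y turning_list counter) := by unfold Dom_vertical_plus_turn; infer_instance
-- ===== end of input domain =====

-- B replaces A's pop-undoing tail recursion by a run-length scan plus one slice deletion (alternative decomposition; return-value equivalence — both Pythons mutate the passed-in list).


-- ===== PORT A =====
-- board[x-1][y] as Python computes it (none = IndexError, excluded by Pre_)
def pvCell (board : List (List Int)) (x y : Int) : Option Int :=
  (PySem.List.pyGet? board x).bind (fun row => PySem.List.pyGet? row y)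

-- 'for i in range(counter): turning_list.pop(-1)' — pop(-1) = dropLast on a
-- nonempty list (Python raises on an empty list; Pre_ excludes that)
def pvPopLoop (tl : List (Int × Int)) (counter : Int) : List (Int × Int) :=
  (PySem.List.pyRange 0 counter 1).foldl (fun acc _ => acc.dropLast) tl

def vertical_plus_turn (board : List (List Int)) (player : Int) (x : Int) (y : Int) (turning_list : List (Int × Int)) (counter : Int) : List (Int × Int) :=
  if _h : x > 0 then
    match pvCell board (x - 1) y with
    | some c =>
      if c = -player then
        vertical_plus_turn board player (x - 1) y (turning_list ++ [(x - 1, y)]) (counter + 1)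
      else if c = player then turning_list
      else pvPopLoop turning_list counter
    | none => turning_list   -- IndexError in Python; outside Pre_
  else turning_list
termination_by x.toNat
decreasing_by omega

-- ===== PORT B =====
-- 'k = 0; while k < x and board[x-1-k][y] == -player: k += 1'
def pvScan (board : List (List Int)) (player : Int) (y x : Int) (k : Nat) : Nat :=
  if _h : (k : Int) < x then
    match pvCell board (x - 1 - k) y with
    | some c => if c = -player then pvScan board player y x (k + 1) else k
    | none => k   -- IndexError in Python; outside Pre_
  else k
termination_by (x - k).toNat
decreasing_by omega

def vertical_plus_turn_alt (board : List (List Int)) (player : Int) (x : Int) (y : Int) (turning_list : List (Int × Int)) (counter : Int) : List (Int × Int) :=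
  let k := pvScan board player y x 0
  let tl2 := turning_list ++ (List.range k).map (fun (j : Nat) => (x - 1 - (j : Int), y))
  if _h : (k : Int) < x then
    match pvCell board (x - 1 - (k : Int)) y with
    | some c =>
      if c ≠ player then
        let pops := counter + (k : Int)
        if pops > 0 then tl2.take (tl2.length - pops.toNat) else tl2  -- del tl2[-pops:]
      else tl2
    | none => tl2   -- IndexError in Python; outside Pre_
  else tl2

-- ===== PRECONDITION & SPEC =====
-- Pre_ excludes exactly the inputs where Python A raises: an IndexError on a board
-- access, or popping more elements than the list holds. Row validity is demanded for
-- ALL rows below x because which rows are read depends on the board contents: that is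
-- conservative, e.g. ([[],[1]], 1, 2, 0, [], 0) is excluded although A stops at row 1
-- and returns [] (B returns [] there too).
def Pre_vertical_plus_turn (board : List (List Int)) (player : Int) (x : Int) (y : Int) (turning_list : List (Int × Int)) (counter : Int) : Prop :=
  x ≤ 0 ∨ (x ≤ (board.length : Int) ∧ counter ≤ (turning_list.length : Int) ∧
    ∀ row ∈ board.take x.toNat, (PySem.List.pyGet? row y).isSome)
instance (board : List (List Int)) (player : Int) (x : Int) (y : Int) (turning_list : List (Int × Int)) (counter : Int) : Decidable (Pre_vertical_plus_turn board player x y turning_list counter) := by unfold Pre_vertical_plus_turn; infer_instance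

def pvWitness_vertical_plus_turn : List (List Int) × Int × Int × Int × (List (Int × Int)) × Int :=
  ([[1], [-1]], 1, 2, 0, [], 0)

def Spec_vertical_plus_turn (board : List (List Int)) (player : Int) (x : Int) (y : Int) (turning_list : List (Int × Int)) (counter : Int) (out : List (Int × Int)) : Prop := out = vertical_plus_turn_alt board player x y turning_list counter
instance (board : List (List Int)) (player : Int) (x : Int) (y : Int) (turning_list : List (Int × Int)) (counter : Int) (out : List (Int × Int)) : Decidable (Spec_vertical_plus_turn board player x y turning_list counter out) := by unfold Spec_vertical_plus_turn; infer_instance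

-- ===== CLAIM (what is proved, stated in full; the proofs are below) =====
def Claim_equal_vertical_plus_turn : Prop := ∀ (board : List (List Int)) (player : Int) (x : Int) (y : Int) (turning_list : List (Int × Int)) (counter : Int), Dom_vertical_plus_turn board player x y turning_list counter → Pre_vertical_plus_turn board player x y turning_list counter → Spec_vertical_plus_turn board player x y turning_list counter (vertical_plus_turn board player x y turning_list counter)

-- ===== LEMMAS AND PROOFS =====

-- iterated pop(-1) (dropLast) is one take
theorem foldl_dropLast_eq_take {α : Type} (r : List Int) (l : List α) :
    r.foldl (fun acc _ => acc.dropLast) l = l.take (l.length - r.length) := by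
  induction r generalizing l with
  | nil => simp
  | cons a r ih =>
      rw [List.foldl_cons]
      show r.foldl _ l.dropLast = _
      rw [ih, List.dropLast_eq_take, List.take_take, List.length_take]
      congr 1
      simp only [List.length_cons]
      omega

theorem pvPopLoop_eq_take (tl : List (Int × Int)) (counter : Int) :
    pvPopLoop tl counter = tl.take (tl.length - counter.toNat) := by
  rw [pvPopLoop, foldl_dropLast_eq_take, PySem.List.length_pyRange_one]
  simp

-- shifting B's scan down one row
theorem pvScan_shift (board : List (List Int)) (player y : Int) :
    ∀ (n : Nat) (x : Int) (k : Nat), (x - 1 - k).toNat ≤ n →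
      pvScan board player y x (k + 1) = pvScan board player y (x - 1) k + 1 := by
  intro n
  induction n with
  | zero =>
      intro x k h
      have hx2 : ¬ ((k + 1 : Nat) : Int) < x := by push_cast; omega
      have hx1 : ¬ ((k : Nat) : Int) < x - 1 := by omega
      conv_lhs => rw [pvScan]
      conv_rhs => rw [pvScan]
      rw [dif_neg hx2, dif_neg hx1]
  | succ n ih =>
      intro x k h
      by_cases hx1 : ((k : Nat) : Int) < x - 1
      · have hx2 : ((k + 1 : Nat) : Int) < x := by push_cast at hx1 ⊢; omega
        conv_lhs => rw [pvScan]
        conv_rhs => rw [pvScan]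
        rw [dif_pos hx2, dif_pos hx1]
        have hc : x - 1 - ((k + 1 : Nat) : Int) = x - 1 - 1 - (k : Int) := by push_cast; ring
        rw [hc]
        cases hcv : pvCell board (x - 1 - 1 - (k : Int)) y with
        | none => rfl
        | some c =>
            dsimp only
            by_cases hcp : c = -player
            · rw [if_pos hcp, if_pos hcp]
              exact ih x (k + 1) (by push_cast at h ⊢; omega)
            · rw [if_neg hcp, if_neg hcp]
      · have hx2 : ¬ ((k + 1 : Nat) : Int) < x := by push_cast at hx1 ⊢; omega
        conv_lhs => rw [pvScan]
        conv_rhs => rw [pvScan]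
        rw [dif_neg hx2, dif_neg hx1]

theorem cast_zero_cell (x : Int) : x - 1 - ((0 : Nat) : Int) = x - 1 := by simp

-- B's value when the current cell holds an opponent tile: alt absorbs one step
theorem alt_step (board : List (List Int)) (player x y : Int) (tl : List (Int × Int))
    (counter : Int) (hx : 0 < x) (hcell : pvCell board (x - 1) y = some (-player)) :
    vertical_plus_turn_alt board player x y tl counter =
      vertical_plus_turn_alt board player (x - 1) y (tl ++ [(x - 1, y)]) (counter + 1) := by
  have h0x : ((0 : Nat) : Int) < x := by push_cast; omega
  have hk : pvScan board player y x 0 =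
      pvScan board player y (x - 1) 0 + 1 := by
    conv_lhs => rw [pvScan]
    rw [dif_pos h0x, cast_zero_cell, hcell]
    dsimp only
    rw [if_pos rfl]
    exact pvScan_shift board player y (x - 1 - (0 : Nat)).toNat x 0 le_rfl
  set k' := pvScan board player y (x - 1) 0 with hk'
  simp only [vertical_plus_turn_alt, hk]
  have hlist : tl ++ (List.range (k' + 1)).map (fun (j : Nat) => (x - 1 - (j : Int), y)) =
      (tl ++ [(x - 1, y)]) ++ (List.range k').map (fun (j : Nat) => (x - 1 - 1 - (j : Int), y)) := by
    rw [List.range_succ_eq_map, List.map_cons, List.map_map]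
    simp only [Nat.cast_zero, sub_zero, List.append_assoc, List.singleton_append]
    congr 2
    apply List.map_congr_left
    intro j _
    simp only [Function.comp_apply, Prod.mk.injEq]
    refine ⟨by push_cast; ring, trivial⟩
  rw [hlist]
  by_cases hlt : ((k' + 1 : Nat) : Int) < x
  · have hlt' : ((k' : Nat) : Int) < x - 1 := by push_cast at hlt ⊢; omega
    rw [dif_pos hlt, dif_pos hlt']
    have hc2 : x - 1 - ((k' + 1 : Nat) : Int) = x - 1 - 1 - (k' : Int) := by push_cast; ring
    rw [hc2]
    cases pvCell board (x - 1 - 1 - (k' : Int)) y with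
    | none => rfl
    | some c2 =>
        dsimp only
        by_cases hc2p : c2 ≠ player
        · rw [if_pos hc2p, if_pos hc2p]
          have hpops : counter + ((k' + 1 : Nat) : Int) = counter + 1 + (k' : Int) := by
            push_cast; ring
          rw [hpops]
        · rw [if_neg hc2p, if_neg hc2p]
  · have hlt' : ¬ ((k' : Nat) : Int) < x - 1 := by push_cast at hlt ⊢; omega
    rw [dif_neg hlt, dif_neg hlt']

-- the heart: A's recursion equals B's scan-extend-slice on every input
-- (at a would-be IndexError both ports return the accumulated list)
theorem vpt_eq_alt (board : List (List Int)) (player y : Int) :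
    ∀ (n : Nat) (x : Int) (tl : List (Int × Int)) (counter : Int), x.toNat ≤ n →
      vertical_plus_turn board player x y tl counter =
      vertical_plus_turn_alt board player x y tl counter := by
  intro n
  induction n with
  | zero =>
      intro x tl counter h
      have hx : ¬ x > 0 := by omega
      have h0x : ¬ ((0 : Nat) : Int) < x := by push_cast; omega
      conv_lhs => rw [vertical_plus_turn]
      rw [dif_neg hx]
      have hk : pvScan board player y x 0 = 0 := by
        rw [pvScan, dif_neg h0x]
      simp only [vertical_plus_turn_alt, hk]
      rw [dif_neg h0x]
      simp
  | succ n ih =>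
      intro x tl counter h
      by_cases hx : x > 0
      · have h0x : ((0 : Nat) : Int) < x := by push_cast; omega
        conv_lhs => rw [vertical_plus_turn]
        rw [dif_pos hx]
        cases hcell : pvCell board (x - 1) y with
        | none =>
            have hk : pvScan board player y x 0 = 0 := by
              rw [pvScan, dif_pos h0x, cast_zero_cell, hcell]
            simp only [vertical_plus_turn_alt, hk, List.range_zero, List.map_nil,
              List.append_nil]
            rw [dif_pos h0x, cast_zero_cell, hcell]
        | some c =>
            dsimp only
            by_cases hcp : c = -player
            · rw [if_pos hcp]
              rw [ih (x - 1) (tl ++ [(x - 1, y)]) (counter + 1) (by omega)]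
              rw [← alt_step board player x y tl counter hx
                (by rw [hcp] at hcell; exact hcell)]
            · rw [if_neg hcp]
              have hk : pvScan board player y x 0 = 0 := by
                rw [pvScan, dif_pos h0x, cast_zero_cell, hcell]
                dsimp only
                rw [if_neg hcp]
              simp only [vertical_plus_turn_alt, hk, List.range_zero, List.map_nil,
                List.append_nil, Nat.cast_zero, add_zero]
              rw [dif_pos hx, show x - 1 - (0 : Int) = x - 1 by ring, hcell]
              dsimp only
              by_cases hcq : c = player
              · rw [if_pos hcq, if_neg (show ¬ c ≠ player by simp [hcq])]
              · rw [if_neg hcq, if_pos (show c ≠ player from hcq)]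
                rw [pvPopLoop_eq_take]
                by_cases hpos : counter > 0
                · rw [if_pos hpos]
                · rw [if_neg hpos]
                  have hc0 : counter.toNat = 0 := by omega
                  rw [hc0]
                  simp
      · have h0x : ¬ ((0 : Nat) : Int) < x := by push_cast; omega
        conv_lhs => rw [vertical_plus_turn]
        rw [dif_neg hx]
        have hk : pvScan board player y x 0 = 0 := by
          rw [pvScan, dif_neg h0x]
        simp only [vertical_plus_turn_alt, hk]
        rw [dif_neg h0x]
        simp


-- ===== VERDICT (by name: the statement is the Claim_ definition above) =====
theorem vertical_plus_turn_spec : Claim_equal_vertical_plus_turn := by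
  intro board player x y tl counter _ _
  unfold Spec_vertical_plus_turn
  exact vpt_eq_alt board player y x.toNat x tl counter le_rfl
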